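-- pv_equiv track=rewrite | github.com/acgrdumlu/CodeWars-and-HackerRank | Python/pauls_misery.py | paul
-- ===== SOURCE A (Python) =====
-- misery = {
-- 	'kata': 5,
-- 	'Petes kata': 10,
-- 	'life': 0,
-- 	'eating': 1
-- }
--
-- def paul(x):
-- 	score = 0
-- 	for task in x:
-- 		score += misery.get(task, 0)
-- 	if score < 40:
-- 		return 'Super happy!'
-- 	elif 40 <= score < 70:
-- 		return 'Happy!'
-- 	elif 70 <= score < 100:
-- 		return 'Sad!'
-- 	elif score >= 100:
-- 		return 'Miserable!'
-- ===== SOURCE B (Python) =====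
-- misery = {
-- 	'kata': 5,
-- 	'Petes kata': 10,
-- 	'life': 0,
-- 	'eating': 1
-- }
--
-- _THRESHOLDS = [40, 70, 100]
-- _LABELS = ['Super happy!', 'Happy!', 'Sad!', 'Miserable!']
--
-- def paul(x):
-- 	# build a histogram of tasks in one pass; no misery lookups while scanning x
-- 	counts = {}
-- 	for task in x:
-- 		counts[task] = counts.get(task, 0) + 1
-- 	# weighted sum over the (fixed, 4-entry) misery table, not over x
-- 	score = 0
-- 	for task, w in misery.items():
-- 		score += w * counts.get(task, 0)
-- 	# binary search for the mood band (bisect_right by hand, no imports)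
-- 	lo, hi = 0, len(_THRESHOLDS)
-- 	while lo < hi:
-- 		mid = (lo + hi) // 2
-- 		if score < _THRESHOLDS[mid]:
-- 			hi = mid
-- 		else:
-- 			lo = mid + 1
-- 	return _LABELS[lo]
-- ===== Notes on version B (the rewrite author's own statement) =====
-- stated objective: alternative
-- what changed: B replaces A's per-element dict-lookup accumulation with a histogram (Counter-style dict) built in one pass followed by a weighted sum over the fixed misery table, and replaces the if/elif cascade with a binary search (bisect_right by hand) into a threshold/label table.
import Mathlib
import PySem

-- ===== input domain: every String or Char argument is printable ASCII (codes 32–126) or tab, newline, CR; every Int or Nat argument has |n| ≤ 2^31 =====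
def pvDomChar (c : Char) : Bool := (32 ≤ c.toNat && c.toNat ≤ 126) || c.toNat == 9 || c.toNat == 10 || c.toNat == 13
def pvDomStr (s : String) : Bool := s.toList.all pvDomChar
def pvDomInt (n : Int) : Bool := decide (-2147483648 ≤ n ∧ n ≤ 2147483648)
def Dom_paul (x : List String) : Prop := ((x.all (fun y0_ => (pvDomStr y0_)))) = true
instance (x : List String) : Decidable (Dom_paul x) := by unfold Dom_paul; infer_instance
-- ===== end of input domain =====

-- B builds a histogram of x, takes a weighted sum over the fixed misery table, and
-- classifies by binary search into a threshold/label table (alternative; same O(n) cost).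

-- ===== PORT A =====
def pvMisery : PySem.Dict String Int :=
  PySem.Dict.ofList [("kata", 5), ("Petes kata", 10), ("life", 0), ("eating", 1)]

def paul (x : List String) : String :=
  let score : Int := x.foldl (fun score task => score + PySem.Dict.getD pvMisery task 0) 0
  if score < 40 then "Super happy!"
  else if 40 ≤ score ∧ score < 70 then "Happy!"
  else if 70 ≤ score ∧ score < 100 then "Sad!"
  else if 100 ≤ score then "Miserable!"
  else ""  -- Python falls off the cascade here (None); unreachable: the four branches cover every Int

-- ===== PORT B =====
def pvThresholds : List Int := [40, 70, 100]
def pvLabels : List String := ["Super happy!", "Happy!", "Sad!", "Miserable!"]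

-- Source B's while lo < hi binary search, as the obvious recursion on hi - lo;
-- the index mid is always in range, so pyGetD's default is never read
def pvBisect (score : Int) (lo hi : Nat) : Nat :=
  if lo < hi then
    let mid := (lo + hi) / 2
    if score < PySem.List.pyGetD pvThresholds (mid : Int) 0 then pvBisect score lo mid
    else pvBisect score (mid + 1) hi
  else lo
termination_by hi - lo
decreasing_by all_goals omega

def paul_alt (x : List String) : String :=
  let counts : PySem.Dict String Int :=
    x.foldl (fun d task => d.insert task (d.getD task 0 + 1)) PySem.Dict.empty
  let score : Int := pvMisery.items.foldl (fun s p => s + p.2 * counts.getD p.1 0) 0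
  PySem.List.pyGetD pvLabels (pvBisect score 0 pvThresholds.length : Int) ""

-- ===== PRECONDITION & SPEC =====
def Spec_paul (x : List String) (out : String) : Prop := out = paul_alt x
instance (x : List String) (out : String) : Decidable (Spec_paul x out) := by unfold Spec_paul; infer_instance

-- ===== CLAIM (what is proved, stated in full; the proofs are below) =====
def Claim_equal_paul : Prop := ∀ (x : List String), Dom_paul x → Spec_paul x (paul x)

-- ===== LEMMAS AND PROOFS =====

-- A's dict lookup, resolved key by key
theorem pv_getD_misery (t : String) :
    PySem.Dict.getD pvMisery t 0
      = if t = "kata" then 5 else if t = "Petes kata" then 10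
        else if t = "eating" then 1 else 0 := by
  have hi : pvMisery.items = [("kata", (5:Int)), ("Petes kata", 10), ("life", 0), ("eating", 1)] := by
    decide
  simp only [PySem.Dict.getD, PySem.Dict.get?, hi, List.find?]
  by_cases h1 : t = "kata" <;> by_cases h2 : t = "Petes kata" <;>
    by_cases h3 : t = "life" <;> by_cases h4 : t = "eating" <;>
    simp [h1, h2, h3, h4,
      show ∀ s : String, t ≠ s → (s == t) = false from
        fun s hne => beq_eq_false_iff_ne.mpr (fun h => hne h.symm)]

-- A's per-element lookup loop equals a weighted sum of occurrence counts
theorem pv_scoreA_eq (x : List String) (a : Int) :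
    x.foldl (fun score task => score + PySem.Dict.getD pvMisery task 0) a
      = a + 5 * ((List.count "kata" x : Int))
          + 10 * ((List.count "Petes kata" x : Int)) + ((List.count "eating" x : Int)) := by
  induction x generalizing a with
  | nil => simp
  | cons h t ih =>
    rw [List.foldl_cons, ih, pv_getD_misery]
    simp only [List.count_cons]
    by_cases h1 : h = "kata" <;> by_cases h2 : h = "Petes kata" <;> by_cases h3 : h = "eating" <;>
      simp_all <;> ring_nf

-- B's histogram is PySem's Counter, so its weighted sum is the same weighted counts
theorem pv_scoreB_eq (x : List String) :
    pvMisery.items.foldl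
        (fun s p => s + p.2 *
          (x.foldl (fun d task => d.insert task (d.getD task 0 + 1)) PySem.Dict.empty).getD p.1 0) 0
      = 5 * ((List.count "kata" x : Int))
          + 10 * ((List.count "Petes kata" x : Int)) + ((List.count "eating" x : Int)) := by
  rw [PySem.Dict.foldl_insert_getD_add_one_eq_counter]
  have hi : pvMisery.items = [("kata", (5:Int)), ("Petes kata", 10), ("life", 0), ("eating", 1)] := by
    decide
  simp [hi, PySem.Dict.getD_counter]

-- B's binary search over [40, 70, 100], evaluated for every score
theorem pv_bisect_eq (score : Int) :
    pvBisect score 0 3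
      = if score < 40 then 0 else if score < 70 then 1 else if score < 100 then 2 else 3 := by
  by_cases h70 : score < 70
  · by_cases h40 : score < 40 <;>
      simp [pvBisect, PySem.List.pyGetD, PySem.List.pyGet?, PySem.List.pyIdx?,
            pvThresholds, h70, h40]
  · by_cases h100 : score < 100 <;>
      simp [pvBisect, PySem.List.pyGetD, PySem.List.pyGet?, PySem.List.pyIdx?,
            pvThresholds, h70, h100] <;> omega

-- ===== VERDICT (by name: the statement is the Claim_ definition above) =====
theorem paul_spec : Claim_equal_paul := by
  intro x _
  unfold Spec_paul paul paul_alt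
  simp only []
  rw [pv_scoreA_eq, pv_scoreB_eq]
  rw [show pvThresholds.length = 3 from rfl, pv_bisect_eq]
  set k : Int := 5 * (List.count "kata" x) + 10 * (List.count "Petes kata" x)
      + (List.count "eating" x) with hk
  by_cases h40 : (0:Int) + 5 * (List.count "kata" x) + 10 * (List.count "Petes kata" x)
      + (List.count "eating" x) < 40
  all_goals by_cases h70 : (0:Int) + 5 * (List.count "kata" x) + 10 * (List.count "Petes kata" x)
      + (List.count "eating" x) < 70
  all_goals by_cases h100 : (0:Int) + 5 * (List.count "kata" x) + 10 * (List.count "Petes kata" x)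
      + (List.count "eating" x) < 100
  all_goals first
    | omega
    | (simp only [hk]
       split_ifs <;> simp_all [PySem.List.pyGetD, PySem.List.pyGet?, PySem.List.pyIdx?, pvLabels])
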